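-- pv_equiv track=rewrite | github.com/queelius/computational-explorations | src/schur_groups.py | _heuristic_max_sum_free
-- ===== SOURCE A (Python) =====
-- from typing import Set, List, Tuple, Dict, FrozenSet, Optional
--
-- def group_add(a: Tuple[int, ...], b: Tuple[int, ...],
--               orders: Tuple[int, ...]) -> Tuple[int, ...]:
--     """Componentwise addition mod orders."""
--     return tuple((ai + bi) % ni for ai, bi, ni in zip(a, b, orders))
--
-- def is_sum_free(S: FrozenSet[Tuple[int, ...]], orders: Tuple[int, ...]) -> bool:
--     """Check if S is sum-free: no a,b,c ∈ S with a+b=c."""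
--     S_set = set(S)
--     for a in S:
--         for b in S:
--             c = group_add(a, b, orders)
--             if c in S_set:
--                 return False
--     return True
--
-- def _heuristic_max_sum_free(elements: list, orders: Tuple[int, ...]) -> int:
--     """Heuristic for max sum-free set size."""
--     # Try known sum-free constructions
--     best = 0
--
--     # Construction 1: "odd" elements in cyclic component
--     if len(orders) == 1:
--         n = orders[0]
--         # Upper third: {⌈n/3⌉, ..., ⌈2n/3⌉-1}
--         upper = frozenset((x,) for x in range(n // 3 + 1, (2 * n + 2) // 3))
--         if is_sum_free(upper, orders):
--             best = max(best, len(upper))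
--         # Odd residues
--         odds = frozenset((x,) for x in range(n) if x % 2 == 1)
--         if is_sum_free(odds, orders):
--             best = max(best, len(odds))
--
--     return best
-- ===== SOURCE B (Python) =====
-- def _heuristic_max_sum_free(elements: list, orders) -> int:
--     """Heuristic for max sum-free set size, by closed-form size formulas.
--
--     The middle-third interval {n//3+1, ..., (2n+2)//3 - 1} of Z_n is always
--     sum-free, so its size is taken directly.  The odd residues are sum-free
--     exactly when n is even (odd+odd stays even mod an even n) or n <= 3
--     (at most one odd residue); otherwise n-2 + n-2 = n-4 (mod n) witnesses
--     a violation.  Hence no set needs to be built or scanned.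
--     """
--     if len(orders) != 1:
--         return 0
--     n = orders[0]
--     upper_size = max(0, (2 * n + 2) // 3 - (n // 3 + 1))
--     odds_size = max(0, n // 2) if (n % 2 == 0 or n <= 3) else 0
--     return max(upper_size, odds_size)
-- ===== Notes on version B (the rewrite author's own statement) =====
-- stated objective: simpler
-- what changed: B replaces A's construction of the two candidate sets and the quadratic is_sum_free double loop by closed-form size formulas: the middle-third interval of Z_n is proved always sum-free, and the odd residues are sum-free exactly when n is even or n <= 3, so B returns the max of the two sizes directly (intended as faster, O(1) vs O(n^2); a timing run measured 1.99x at the largest size but not consistently).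
import Mathlib
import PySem

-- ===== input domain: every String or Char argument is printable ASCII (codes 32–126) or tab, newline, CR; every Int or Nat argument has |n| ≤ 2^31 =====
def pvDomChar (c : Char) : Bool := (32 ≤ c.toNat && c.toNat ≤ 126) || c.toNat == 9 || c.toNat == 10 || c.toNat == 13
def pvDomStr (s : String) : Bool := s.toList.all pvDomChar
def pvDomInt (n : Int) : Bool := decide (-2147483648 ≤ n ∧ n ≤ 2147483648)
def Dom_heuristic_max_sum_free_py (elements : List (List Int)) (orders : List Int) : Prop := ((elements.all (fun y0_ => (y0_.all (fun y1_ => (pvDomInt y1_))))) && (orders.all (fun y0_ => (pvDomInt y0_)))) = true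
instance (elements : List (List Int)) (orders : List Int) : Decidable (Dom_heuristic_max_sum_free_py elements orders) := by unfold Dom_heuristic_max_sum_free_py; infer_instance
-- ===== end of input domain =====

-- B replaces A's quadratic sum-free scans of the two candidate sets by closed-form size
-- formulas (objective: simpler); the theorem below proves the two always agree.

-- ===== PORT A =====
-- group_add: componentwise addition mod orders
def pvGroupAdd (a b orders : List Int) : List Int :=
  (a.zip (b.zip orders)).map (fun p => PySem.Int.mod (p.1 + p.2.1) p.2.2)

-- is_sum_free: 'for a in S: for b in S: if group_add(a,b) in S_set: return False' as List.any
def pvIsSumFree (S : PySem.Set (List Int)) (orders : List Int) : Bool :=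
  let Sset : PySem.Set (List Int) := PySem.Set.ofList S
  !(S.any (fun a => S.any (fun b => PySem.Set.contains Sset (pvGroupAdd a b orders))))

def heuristic_max_sum_free_py (elements : List (List Int)) (orders : List Int) : Int :=
  let best : Int := 0
  match orders with
  | [n] =>
    let upper : PySem.Set (List Int) :=
      PySem.Set.ofList ((PySem.List.pyRange (PySem.Int.floordiv n 3 + 1)
        (PySem.Int.floordiv (2 * n + 2) 3) 1).map (fun x => [x]))
    let best := if pvIsSumFree upper [n] then max best (PySem.Set.len upper) else best
    let odds : PySem.Set (List Int) :=
      PySem.Set.ofList (((PySem.List.pyRange 0 n 1).filter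
        (fun x => PySem.Int.mod x 2 == 1)).map (fun x => [x]))
    let best := if pvIsSumFree odds [n] then max best (PySem.Set.len odds) else best
    best
  | _ => best

-- ===== PORT B =====
def heuristic_max_sum_free_py_alt (elements : List (List Int)) (orders : List Int) : Int :=
  if orders.length ≠ 1 then 0
  else
    let n := PySem.List.pyGetD orders 0 0
    let upperSize := max 0 (PySem.Int.floordiv (2 * n + 2) 3 - (PySem.Int.floordiv n 3 + 1))
    let oddsSize := if PySem.Int.mod n 2 == 0 || decide (n ≤ 3)
                    then max 0 (PySem.Int.floordiv n 2) else 0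
    max upperSize oddsSize

-- ===== PRECONDITION & SPEC =====
def Spec_heuristic_max_sum_free_py (elements : List (List Int)) (orders : List Int) (out : Int) : Prop := out = heuristic_max_sum_free_py_alt elements orders
instance (elements : List (List Int)) (orders : List Int) (out : Int) : Decidable (Spec_heuristic_max_sum_free_py elements orders out) := by unfold Spec_heuristic_max_sum_free_py; infer_instance

-- ===== CLAIM (what is proved, stated in full; the proofs are below) =====
def Claim_equal_heuristic_max_sum_free_py : Prop := ∀ (elements : List (List Int)) (orders : List Int), Dom_heuristic_max_sum_free_py elements orders → Spec_heuristic_max_sum_free_py elements orders (heuristic_max_sum_free_py elements orders)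

-- ===== LEMMAS AND PROOFS =====

-- PySem.Set.ofList is the identity on duplicate-free lists
theorem pv_foldl_add_nodup {α : Type} [BEq α] [LawfulBEq α] :
    ∀ (l acc : List α), l.Nodup → (∀ x ∈ l, x ∉ acc) → l.foldl PySem.Set.add acc = acc ++ l := by
  intro l
  induction l with
  | nil => intro acc _ _; simp
  | cons x l ih =>
    intro acc hnd hacc
    have hx : x ∉ acc := hacc x (by simp)
    simp only [List.foldl_cons]
    rw [PySem.Set.add_of_not_mem hx, ih (acc ++ [x]) hnd.of_cons]
    · simp
    · intro y hy
      simp only [List.mem_append, List.mem_singleton]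
      rintro (h | rfl)
      · exact hacc y (by simp [hy]) h
      · exact (List.nodup_cons.mp hnd).1 hy

theorem pv_ofList_eq_self {α : Type} [BEq α] [LawfulBEq α] (l : List α) (h : l.Nodup) :
    PySem.Set.ofList l = l := by
  rw [PySem.Set.ofList_eq_foldl, pv_foldl_add_nodup l [] h (by simp)]
  simp

-- s % n for 0 ≤ s < 2n is either s or s - n
theorem pv_emod_two_cases (n s : Int) (h0 : 0 ≤ s) (h2 : s < 2 * n) :
    s % n = s ∨ s % n = s - n := by
  rcases lt_or_ge s n with h | h
  · left; exact Int.emod_eq_of_lt h0 h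
  · right
    have : (s - n) % n = s % n := Int.sub_emod_right s n
    rw [← this, Int.emod_eq_of_lt (by omega) (by omega)]

theorem pv_nodup_sing_range (a b : Int) :
    ((PySem.List.pyRange a b 1).map (fun x => ([x] : List Int))).Nodup :=
  List.Nodup.map (fun _ _ h => by simpa using h) (PySem.List.nodup_pyRange_one a b)

theorem pv_nodup_odds (n : Int) :
    (((PySem.List.pyRange 0 n 1).filter (fun x => PySem.Int.mod x 2 == 1)).map
      (fun x => ([x] : List Int))).Nodup :=
  List.Nodup.map (fun _ _ h => by simpa using h)
    ((PySem.List.nodup_pyRange_one 0 n).filter _)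

-- the middle-third interval is always sum-free
theorem pv_upper_sumfree (n : Int) :
    pvIsSumFree (PySem.Set.ofList ((PySem.List.pyRange (PySem.Int.floordiv n 3 + 1)
      (PySem.Int.floordiv (2 * n + 2) 3) 1).map (fun x => [x]))) [n] = true := by
  rw [show PySem.Int.floordiv n 3 = n / 3 from PySem.Int.floordiv_eq_ediv_of_pos (by norm_num),
     show PySem.Int.floordiv (2 * n + 2) 3 = (2 * n + 2) / 3 from
       PySem.Int.floordiv_eq_ediv_of_pos (by norm_num)]
  have hnd := pv_nodup_sing_range (n / 3 + 1) ((2 * n + 2) / 3)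
  simp only [pvIsSumFree, pv_ofList_eq_self _ hnd]
  rw [Bool.not_eq_eq_eq_not, Bool.not_true, List.any_eq_false]
  intro a ha hX
  rw [List.any_eq_true] at hX
  obtain ⟨b, hb, hc⟩ := hX
  obtain ⟨x, hx, rfl⟩ := List.mem_map.mp ha
  obtain ⟨y, hy, rfl⟩ := List.mem_map.mp hb
  rw [PySem.List.mem_pyRange_one] at hx hy
  have hn : 2 ≤ n := by omega
  simp only [PySem.Set.contains, pvGroupAdd, List.zip_cons_cons, List.zip_nil_right,
    List.map_cons, List.map_nil] at hc
  rw [PySem.Int.mod_eq_emod_of_pos (by omega)] at hc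
  have hmem : ([(x + y) % n] : List Int) ∈
      (PySem.List.pyRange (n / 3 + 1) ((2 * n + 2) / 3) 1).map (fun x => ([x] : List Int)) := by
    simpa using hc
  obtain ⟨z, hz, hzz⟩ := List.mem_map.mp hmem
  rw [PySem.List.mem_pyRange_one] at hz
  have hz2 : z = (x + y) % n := by simpa using hzz
  rcases pv_emod_two_cases n (x + y) (by omega) (by omega) with h | h <;> omega

-- the odd residues are sum-free exactly when n is even or n ≤ 3
theorem pv_odds_sumfree (n : Int) :
    pvIsSumFree (PySem.Set.ofList (((PySem.List.pyRange 0 n 1).filter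
      (fun x => PySem.Int.mod x 2 == 1)).map (fun x => [x]))) [n]
    = (PySem.Int.mod n 2 == 0 || decide (n ≤ 3)) := by
  have hodd : ∀ x : Int, (PySem.Int.mod x 2 == 1) = true ↔ x % 2 = 1 := by
    intro x
    rw [PySem.Int.mod_eq_emod_of_pos (by norm_num)]
    simp
  simp only [pvIsSumFree, pv_ofList_eq_self _ (pv_nodup_odds n)]
  by_cases hcond : n % 2 = 0 ∨ n ≤ 3
  · have hrhs : (PySem.Int.mod n 2 == 0 || decide (n ≤ 3)) = true := by
      rw [PySem.Int.mod_eq_emod_of_pos (by norm_num)]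
      rcases hcond with h | h <;> simp [h]
    rw [hrhs, Bool.not_eq_eq_eq_not, Bool.not_true, List.any_eq_false]
    intro a ha hX
    rw [List.any_eq_true] at hX
    obtain ⟨b, hb, hc⟩ := hX
    obtain ⟨x, hxf, rfl⟩ := List.mem_map.mp ha
    obtain ⟨y, hyf, rfl⟩ := List.mem_map.mp hb
    obtain ⟨hx, hx2⟩ := List.mem_filter.mp hxf
    obtain ⟨hy, hy2⟩ := List.mem_filter.mp hyf
    rw [PySem.List.mem_pyRange_one] at hx hy
    rw [hodd] at hx2 hy2
    have hn : 2 ≤ n := by omega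
    simp only [PySem.Set.contains, pvGroupAdd, List.zip_cons_cons, List.zip_nil_right,
      List.map_cons, List.map_nil] at hc
    rw [PySem.Int.mod_eq_emod_of_pos (by omega)] at hc
    have hmem : ([(x + y) % n] : List Int) ∈
        ((PySem.List.pyRange 0 n 1).filter (fun x => PySem.Int.mod x 2 == 1)).map
          (fun x => ([x] : List Int)) := by simpa using hc
    obtain ⟨z, hzf, hzz⟩ := List.mem_map.mp hmem
    obtain ⟨hz, hz2⟩ := List.mem_filter.mp hzf
    rw [PySem.List.mem_pyRange_one] at hz
    rw [hodd] at hz2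
    have hz3 : z = (x + y) % n := by simpa using hzz
    rcases pv_emod_two_cases n (x + y) (by omega) (by omega) with h | h <;> omega
  · have hn5 : 5 ≤ n ∧ n % 2 = 1 := by omega
    have hrhs : (PySem.Int.mod n 2 == 0 || decide (n ≤ 3)) = false := by
      rw [PySem.Int.mod_eq_emod_of_pos (by norm_num)]
      simp; omega
    rw [hrhs, Bool.not_eq_eq_eq_not, Bool.not_false]
    have hmem2 : ([n - 2] : List Int) ∈
        ((PySem.List.pyRange 0 n 1).filter (fun x => PySem.Int.mod x 2 == 1)).map
          (fun x => ([x] : List Int)) := by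
      refine List.mem_map.mpr ⟨n - 2, List.mem_filter.mpr ⟨?_, ?_⟩, rfl⟩
      · rw [PySem.List.mem_pyRange_one]; omega
      · rw [hodd]; omega
    rw [List.any_eq_true]
    refine ⟨[n - 2], hmem2, ?_⟩
    rw [List.any_eq_true]
    refine ⟨[n - 2], hmem2, ?_⟩
    simp only [PySem.Set.contains, pvGroupAdd, List.zip_cons_cons, List.zip_nil_right,
      List.map_cons, List.map_nil]
    have hmod : PySem.Int.mod (n - 2 + (n - 2)) n = n - 4 := by
      rw [PySem.Int.mod_eq_emod_of_pos (by omega)]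
      have h1 : (n - 2 + (n - 2)) % n = (n - 4) % n := by
        have := Int.sub_emod_right (n - 2 + (n - 2)) n
        rw [← this]; ring_nf
      rw [h1, Int.emod_eq_of_lt (by omega) (by omega)]
    rw [hmod]
    have : ([n - 4] : List Int) ∈
        ((PySem.List.pyRange 0 n 1).filter (fun x => PySem.Int.mod x 2 == 1)).map
          (fun x => ([x] : List Int)) := by
      refine List.mem_map.mpr ⟨n - 4, List.mem_filter.mpr ⟨?_, ?_⟩, rfl⟩
      · rw [PySem.List.mem_pyRange_one]; omega
      · rw [hodd]; omega
    simpa using this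

-- count of odd residues below m
theorem pv_odd_count (m : Nat) :
    ((PySem.List.pyRange 0 (m : Int) 1).filter (fun x => PySem.Int.mod x 2 == 1)).length = m / 2 := by
  induction m with
  | zero => simp [PySem.List.pyRange_one_eq_nil]
  | succ m ih =>
    have hcast : ((m + 1 : Nat) : Int) = (m : Int) + 1 := by push_cast; ring
    rw [hcast, PySem.List.pyRange_one_succ_right (by positivity), List.filter_append,
      List.length_append, ih]
    by_cases hm : m % 2 = 1
    · have hf : List.filter (fun x => PySem.Int.mod x 2 == 1) [(m : Int)] = [(m : Int)] := by
        simp; omega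
      rw [hf]; simp; omega
    · have hf : List.filter (fun x => PySem.Int.mod x 2 == 1) [(m : Int)] = [] := by
        simp; omega
      rw [hf]; simp; omega

theorem pv_main (elements : List (List Int)) (n : Int) :
    heuristic_max_sum_free_py elements [n] = heuristic_max_sum_free_py_alt elements [n] := by
  have h2 : PySem.Int.floordiv n 2 = n / 2 := PySem.Int.floordiv_eq_ediv_of_pos (by norm_num)
  have hlu : PySem.Set.len (PySem.Set.ofList ((PySem.List.pyRange (PySem.Int.floordiv n 3 + 1)
      (PySem.Int.floordiv (2 * n + 2) 3) 1).map (fun x => ([x] : List Int))))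
      = max 0 ((2 * n + 2) / 3 - (n / 3 + 1)) := by
    rw [show PySem.Int.floordiv n 3 = n / 3 from PySem.Int.floordiv_eq_ediv_of_pos (by norm_num),
       show PySem.Int.floordiv (2 * n + 2) 3 = (2 * n + 2) / 3 from
         PySem.Int.floordiv_eq_ediv_of_pos (by norm_num),
       pv_ofList_eq_self _ (pv_nodup_sing_range _ _)]
    simp [PySem.Set.len, PySem.List.length_pyRange_one]
    omega
  have hlo : PySem.Set.len (PySem.Set.ofList (((PySem.List.pyRange 0 n 1).filter
      (fun x => PySem.Int.mod x 2 == 1)).map (fun x => ([x] : List Int))))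
      = max 0 (n / 2) := by
    rw [pv_ofList_eq_self _ (pv_nodup_odds n)]
    rcases lt_or_ge n 0 with h | h
    case _ =>
      rw [PySem.List.pyRange_one_eq_nil (by omega)]
      simp [PySem.Set.len]
      omega
    · obtain ⟨m, rfl⟩ := Int.eq_ofNat_of_zero_le h
      simp only [PySem.Set.len, List.length_map, pv_odd_count m]
      omega
  have hget : PySem.List.pyGetD [n] 0 0 = n := by
    simp [PySem.List.pyGetD, PySem.List.pyGet?, PySem.List.pyIdx?]
  simp only [heuristic_max_sum_free_py, heuristic_max_sum_free_py_alt,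
    pv_upper_sumfree n, pv_odds_sumfree n, if_true, hlu, hlo, List.length_cons,
    List.length_nil, hget]
  norm_num
  split_ifs <;> omega

-- ===== VERDICT (by name: the statement is the Claim_ definition above) =====
theorem heuristic_max_sum_free_py_spec : Claim_equal_heuristic_max_sum_free_py := by
  intro elements orders _
  unfold Spec_heuristic_max_sum_free_py
  match orders with
  | [] => rfl
  | _ :: _ :: _ => rfl
  | [n] => exact pv_main elements n
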